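-- pv_equiv track=rewrite | github.com/vadymhimself/erka-data | erka-services/recom/recom_interface.py | most_similar_id
-- ===== SOURCE A (Python) =====
-- def most_similar_id(values):
--     index = 0
--     max_val = values[0]
--     for i, value in enumerate(values):
--         if value[0] > max_val[0]:
--             max_val = value
--             index = i
--         elif value[0] == max_val[0]:
--             if value[1] < max_val[1]:
--                 max_val = value
--                 index = i
--
--     if max_val[0] == 0:
--         # no sutable id was found
--         return -1
--     return index
-- ===== SOURCE B (Python) =====
-- def most_similar_id(values):
--     # phase 1: global maximum score (touch values[0] first: empty input raises IndexError like A)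
--     m = values[0][0]
--     for score, _ in values:
--         if score > m:
--             m = score
--     # phase 2: among max-score entries pick the one with smallest second component (earliest on ties)
--     cands = [(i, v) for i, v in enumerate(values) if v[0] == m]
--     best = cands[0]
--     for cand in cands[1:]:
--         if cand[1][1] < best[1][1]:
--             best = cand
--     return -1 if m == 0 else best[0]
-- ===== Notes on version B (the rewrite author's own statement) =====
-- stated objective: alternative
-- what changed: Replaced A's single running-best scan (index+pair state with nested tie-break branches) by a two-phase decomposition: one reduction computing the global maximum score, then a filtered pass selecting the earliest minimal-second-component entry among max-score items.
import Mathlib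
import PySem

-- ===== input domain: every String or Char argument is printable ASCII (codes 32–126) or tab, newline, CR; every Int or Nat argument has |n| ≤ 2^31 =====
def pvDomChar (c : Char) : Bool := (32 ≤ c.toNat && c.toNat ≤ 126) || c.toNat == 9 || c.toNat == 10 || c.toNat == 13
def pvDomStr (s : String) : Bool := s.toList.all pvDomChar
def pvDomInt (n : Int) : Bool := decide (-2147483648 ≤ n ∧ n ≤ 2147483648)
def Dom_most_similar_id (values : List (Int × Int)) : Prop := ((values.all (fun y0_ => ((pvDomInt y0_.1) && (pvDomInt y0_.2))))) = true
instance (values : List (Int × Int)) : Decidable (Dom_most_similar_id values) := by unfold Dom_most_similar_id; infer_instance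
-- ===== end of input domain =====

-- B replaces A's single running-best scan by a two-phase pass (global max score, then
-- earliest min-second-component among max-score entries); equivalence of return values on nonempty input.

-- ===== PORT A =====
-- A's single scan: state (index, max_val), branches in A's order; values[0] raises on [] (excluded by Pre_).
def most_similar_id (values : List (Int × Int)) : Int :=
  match values with
  | [] => 0  -- IndexError in Python; outside Pre_
  | v0 :: _ =>
    let st := (PySem.List.enumerate values 0).foldl
      (fun (s : Int × (Int × Int)) p =>
        if p.2.1 > s.2.1 then p
        else if p.2.1 = s.2.1 then (if p.2.2 < s.2.2 then p else s)
        else s)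
      (0, v0)
    if st.2.1 = 0 then -1 else st.1

-- ===== PORT B =====
-- B's two phases: a max-score reduction over values, then a filtered selection pass.
def most_similar_id_alt (values : List (Int × Int)) : Int :=
  match values with
  | [] => 0  -- IndexError in Python (values[0][0]); outside Pre_
  | v0 :: _ =>
    let m := values.foldl (fun m p => if p.1 > m then p.1 else m) v0.1
    let cands := (PySem.List.enumerate values 0).filter (fun p => p.2.1 = m)
    match cands with
    | [] => 0  -- unreachable: the maximum is attained
    | c :: cs =>
      let best := cs.foldl (fun b p => if p.2.2 < b.2.2 then p else b) c
      if m = 0 then -1 else best.1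

-- ===== PRECONDITION & SPEC =====
-- Pre_ excludes only the empty list, on which Python A raises IndexError (values[0]).
def Pre_most_similar_id (values : List (Int × Int)) : Prop := values ≠ []
instance (values : List (Int × Int)) : Decidable (Pre_most_similar_id values) := by unfold Pre_most_similar_id; infer_instance
def pvWitness_most_similar_id : (List (Int × Int)) := [(3, 1), (3, 0), (2, 5)]
def Spec_most_similar_id (values : List (Int × Int)) (out : Int) : Prop := out = most_similar_id_alt values
instance (values : List (Int × Int)) (out : Int) : Decidable (Spec_most_similar_id values out) := by unfold Spec_most_similar_id; infer_instance

-- ===== CLAIM (what is proved, stated in full; the proofs are below) =====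
def Claim_equal_most_similar_id : Prop := ∀ (values : List (Int × Int)), Dom_most_similar_id values → Pre_most_similar_id values → Spec_most_similar_id values (most_similar_id values)

-- ===== LEMMAS AND PROOFS =====

-- abbreviations for the two fold steps and the selection
def pvRepl (s p : Int × (Int × Int)) : Int × (Int × Int) :=
  if p.2.1 > s.2.1 then p else if p.2.1 = s.2.1 then (if p.2.2 < s.2.2 then p else s) else s

def pvMinb (b p : Int × (Int × Int)) : Int × (Int × Int) :=
  if p.2.2 < b.2.2 then p else b

def pvMinbList : List (Int × (Int × Int)) → Option (Int × (Int × Int))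
  | [] => none
  | c :: cs => some (cs.foldl pvMinb c)

def pvMaxs (m : Int) (s : Int) : Int := if s > m then s else m

theorem init_le_foldl_maxs (l : List Int) (m : Int) : m ≤ l.foldl pvMaxs m := by
  induction l generalizing m with
  | nil => simp
  | cons a t ih =>
    simp only [List.foldl_cons]
    refine le_trans ?_ (ih (pvMaxs m a))
    simp [pvMaxs]; split <;> omega

theorem mem_le_foldl_maxs (l : List Int) (m : Int) (x : Int) (hx : x ∈ l) :
    x ≤ l.foldl pvMaxs m := by
  induction l generalizing m with
  | nil => simp at hx
  | cons a t ih =>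
    simp only [List.foldl_cons]
    rcases List.mem_cons.mp hx with h | h
    · subst h
      refine le_trans ?_ (init_le_foldl_maxs t (pvMaxs m x))
      simp [pvMaxs]; split <;> omega
    · exact ih _ h

-- the score component of A's running state is the running maximum
theorem repl_score_step (s a : Int × (Int × Int)) :
    (pvRepl s a).2.1 = pvMaxs s.2.1 a.2.1 := by
  simp only [pvRepl, pvMaxs]
  split_ifs <;> simp_all

theorem score_foldl_repl (l : List (Int × (Int × Int))) (s : Int × (Int × Int)) :
    (l.foldl pvRepl s).2.1 = (l.map (fun p => p.2.1)).foldl pvMaxs s.2.1 := by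
  induction l generalizing s with
  | nil => rfl
  | cons a t ih =>
    simp only [List.foldl_cons, List.map_cons]
    rw [ih, repl_score_step]

-- MAIN: the one-pass running best equals the two-phase (max, then min-b among max) selection
theorem main_lemma (l : List (Int × (Int × Int))) (s0 : Int × (Int × Int)) :
    pvMinbList ((s0 :: l).filter
        (fun p => p.2.1 = (l.map (fun p => p.2.1)).foldl pvMaxs s0.2.1))
      = some (l.foldl pvRepl s0) := by
  induction l using List.reverseRecOn with
  | nil => simp [pvMinbList]
  | append_singleton t p ih =>
    have hM : ((t ++ [p]).map (fun p => p.2.1)).foldl pvMaxs s0.2.1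
        = pvMaxs ((t.map (fun p => p.2.1)).foldl pvMaxs s0.2.1) p.2.1 := by
      simp [List.foldl_append]
    set M := (t.map (fun p => p.2.1)).foldl pvMaxs s0.2.1 with hMdef
    have hr : (t.foldl pvRepl s0).2.1 = M := score_foldl_repl t s0
    rw [List.foldl_append]
    simp only [List.foldl_cons, List.foldl_nil]
    by_cases hgt : p.2.1 > M
    · -- new strict maximum: the filtered list collapses to [p]
      have hMnew : ((t ++ [p]).map (fun p => p.2.1)).foldl pvMaxs s0.2.1 = p.2.1 := by
        rw [hM]; simp [pvMaxs, hgt]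
      rw [hMnew]
      have hfilter : ((s0 :: t).filter (fun q => q.2.1 = p.2.1)) = [] := by
        rw [List.filter_eq_nil_iff]
        intro q hq
        simp only [decide_eq_true_eq]
        rcases List.mem_cons.mp hq with h | h
        · subst h; have := init_le_foldl_maxs (t.map (fun p => p.2.1)) q.2.1; rw [← hMdef] at this; omega
        · have : q.2.1 ≤ M := by
            have := mem_le_foldl_maxs (t.map (fun p => p.2.1)) s0.2.1 q.2.1
              (List.mem_map.mpr ⟨q, h, rfl⟩)
            rw [← hMdef] at this; exact this
          omega
      have : (s0 :: (t ++ [p])).filter (fun q => q.2.1 = p.2.1)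
          = ((s0 :: t).filter (fun q => q.2.1 = p.2.1)) ++ [p] := by
        rw [show s0 :: (t ++ [p]) = (s0 :: t) ++ [p] by simp, List.filter_append]
        simp
      rw [this, hfilter]
      simp [pvMinbList, pvRepl, hgt, hr]
    · have hMnew : ((t ++ [p]).map (fun p => p.2.1)).foldl pvMaxs s0.2.1 = M := by
        rw [hM]; simp [pvMaxs]; omega
      rw [hMnew]
      have hsplit : (s0 :: (t ++ [p])).filter (fun q => q.2.1 = M)
          = ((s0 :: t).filter (fun q => q.2.1 = M)) ++ (if p.2.1 = M then [p] else []) := by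
        rw [show s0 :: (t ++ [p]) = (s0 :: t) ++ [p] by simp, List.filter_append]
        by_cases h : p.2.1 = M <;> simp [h]
      rw [hsplit]
      rw [hMdef] at ih
      by_cases heq : p.2.1 = M
      · -- same score: appended to candidates; selection continues with pvMinb
        rw [if_pos heq]
        rcases hc : (s0 :: t).filter (fun q => q.2.1 = M) with _ | ⟨c, cs⟩
        · rw [hc] at ih; simp [pvMinbList] at ih
        · rw [hc] at ih
          simp only [pvMinbList, Option.some.injEq] at ih
          rw [hc, List.cons_append]
          show some ((cs ++ [p]).foldl pvMinb c) = some (pvRepl (t.foldl pvRepl s0) p)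
          rw [List.foldl_append, ih]
          simp [pvRepl, pvMinb, heq, hr]
      · rw [if_neg heq, List.append_nil, ih]
        have hfix : pvRepl (t.foldl pvRepl s0) p = t.foldl pvRepl s0 := by
          simp only [pvRepl, hr]
          rw [if_neg hgt, if_neg heq]
        rw [hfix]

-- B's phase-1 fold over values equals the same fold over the enumerated list's scores
theorem maxs_enumerate (values : List (Int × Int)) (s : Int) (m : Int) :
    ((PySem.List.enumerate values s).map (fun p => p.2.1)).foldl pvMaxs m
      = values.foldl (fun m p => if p.1 > m then p.1 else m) m := by
  induction values generalizing s m with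
  | nil => simp [PySem.List.enumerate_nil]
  | cons v t ih => simp [PySem.List.enumerate_cons, pvMaxs, ih]

-- duplicated head does not change the selection
theorem minbList_dup (x : Int × (Int × Int)) (t : List (Int × (Int × Int)))
    (pred : Int × (Int × Int) → Bool) :
    pvMinbList ((x :: x :: t).filter pred) = pvMinbList ((x :: t).filter pred) := by
  by_cases h : pred x = true
  · simp only [List.filter_cons, h, if_pos]
    simp [pvMinbList, pvMinb]
  · simp [h]

-- ===== VERDICT (by name: the statement is the Claim_ definition above) =====
theorem most_similar_id_spec : Claim_equal_most_similar_id := by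
  intro values _ hpre
  unfold Spec_most_similar_id
  match values with
  | [] => exact absurd rfl hpre
  | v0 :: rest =>
    simp only [most_similar_id, most_similar_id_alt]
    have eA : (fun (s p : Int × (Int × Int)) =>
        if p.2.1 > s.2.1 then p
        else if p.2.1 = s.2.1 then (if p.2.2 < s.2.2 then p else s) else s) = pvRepl := rfl
    have eB : (fun (b p : Int × (Int × Int)) => if p.2.2 < b.2.2 then p else b) = pvMinb := rfl
    rw [eA, eB]
    have hm : ((PySem.List.enumerate (v0 :: rest) 0).map (fun p => p.2.1)).foldl pvMaxs v0.1
        = (v0 :: rest).foldl (fun m p => if p.1 > m then p.1 else m) v0.1 :=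
      maxs_enumerate (v0 :: rest) 0 v0.1
    set m := (v0 :: rest).foldl (fun m p => if p.1 > m then p.1 else m) v0.1 with hmdef
    set st := (PySem.List.enumerate (v0 :: rest) 0).foldl pvRepl (0, v0) with hstdef
    have hmain := main_lemma (PySem.List.enumerate (v0 :: rest) 0) (0, v0)
    rw [show ((0 : Int), v0).2.1 = v0.1 from rfl, hm, ← hstdef] at hmain
    have hdup : pvMinbList ((((0 : Int), v0) :: PySem.List.enumerate (v0 :: rest) 0).filter
          (fun p => p.2.1 = m))
        = pvMinbList ((PySem.List.enumerate (v0 :: rest) 0).filter (fun p => p.2.1 = m)) := by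
      rw [PySem.List.enumerate_cons]
      exact minbList_dup (0, v0) (PySem.List.enumerate rest 1) _
    rw [hdup] at hmain
    have hscore : st.2.1 = m := by
      rw [hstdef, score_foldl_repl, show ((0 : Int), v0).2.1 = v0.1 from rfl, hm]
    rcases hc : (PySem.List.enumerate (v0 :: rest) 0).filter (fun p => p.2.1 = m)
      with _ | ⟨c, cs⟩
    · rw [hc] at hmain; simp [pvMinbList] at hmain
    · rw [hc] at hmain
      simp only [pvMinbList, Option.some.injEq] at hmain
      rw [hc]
      show (if st.2.1 = 0 then (-1 : Int) else st.1)
          = (if m = 0 then (-1 : Int) else (cs.foldl pvMinb c).1)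
      rw [hmain, hscore]
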